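-- pv_equiv track=rewrite | github.com/EECS570/PIM-Parsing | evaluation/main.py | greedy_schedule
-- ===== SOURCE A (Python) =====
-- NUM_DPUS = 100
--
-- MAX_NODES_PER_DPU = 50
--
-- def greedy_schedule(network):
--     assignment = [[] for _ in range(NUM_DPUS)]
--     node_to_dpu = {}
--     for node in range(len(network)):
--         # Count how many neighbors are in each DPU
--         neighbor_count = [0] * NUM_DPUS
--         for neighbor in network[node]:
--             if neighbor in node_to_dpu:
--                 neighbor_count[node_to_dpu[neighbor]] += 1
--         # Pick the DPU with most neighbors and space
--         sorted_dpus = sorted(range(NUM_DPUS), key=lambda i: -neighbor_count[i])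
--         for dpu in sorted_dpus:
--             if len(assignment[dpu]) < MAX_NODES_PER_DPU:
--                 assignment[dpu].append(node)
--                 node_to_dpu[node] = dpu
--                 break
--     return assignment
-- ===== SOURCE B (Python) =====
-- NUM_DPUS = 100
--
-- MAX_NODES_PER_DPU = 50
--
-- def greedy_schedule(network):
--     assignment = [[] for _ in range(NUM_DPUS)]
--     node_to_dpu = {}
--     for node, neighbors in enumerate(network):
--         neighbor_count = [0] * NUM_DPUS
--         for neighbor in neighbors:
--             if neighbor in node_to_dpu:
--                 neighbor_count[node_to_dpu[neighbor]] += 1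
--         # Single linear scan: best dpu with space, most neighbors, ties -> smallest index
--         best = None
--         best_count = 0
--         for dpu in range(NUM_DPUS):
--             if len(assignment[dpu]) < MAX_NODES_PER_DPU and (best is None or neighbor_count[dpu] > best_count):
--                 best = dpu
--                 best_count = neighbor_count[dpu]
--         if best is not None:
--             assignment[best].append(node)
--             node_to_dpu[node] = best
--     return assignment
-- ===== Notes on version B (the rewrite author's own statement) =====
-- stated objective: simpler
-- what changed: Replaced A's full sort of the 100 DPU indices by descending neighbor count followed by a first-fit break loop with a single linear scan over the DPUs that directly tracks the best non-full DPU (strict '>' so ties go to the smallest index, matching A's stable sort).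
import Mathlib
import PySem

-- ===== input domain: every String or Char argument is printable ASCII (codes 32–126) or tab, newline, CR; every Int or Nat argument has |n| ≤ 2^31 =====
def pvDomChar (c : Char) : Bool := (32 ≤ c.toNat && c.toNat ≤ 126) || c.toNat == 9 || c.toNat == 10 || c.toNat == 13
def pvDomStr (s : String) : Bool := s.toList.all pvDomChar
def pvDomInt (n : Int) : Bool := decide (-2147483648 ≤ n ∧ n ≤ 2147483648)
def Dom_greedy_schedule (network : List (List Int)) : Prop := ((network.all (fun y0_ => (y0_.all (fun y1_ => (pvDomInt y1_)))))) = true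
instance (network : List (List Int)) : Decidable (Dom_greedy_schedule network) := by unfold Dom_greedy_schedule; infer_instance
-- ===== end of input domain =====

-- B replaces A's full sort of the 100 DPU indices plus first-fit scan by one linear scan
-- tracking the best non-full DPU directly (objective: simpler; same observable behaviour).

-- ===== PORT A =====
-- shared helper: the per-node neighbor_count table (identical Python code in A and B);
-- the stored dpu value is always one of 0..99, so `.toNat` on it is exact here
def pvNeighborCounts (ntd : PySem.Dict Int Int) (neighbors : List Int) : List Int :=
  neighbors.foldl (fun nc nb =>
    if ntd.contains nb then
      nc.set (ntd.getD nb 0).toNat (PySem.List.pyGetD nc (ntd.getD nb 0) 0 + 1)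
    else nc) (List.replicate 100 0)

-- assignment[dpu].append(node)  (dpu is always one of 0..99, so `.toNat` is exact)
def pvAppendAt (ass : List (List Int)) (d : Int) (node : Int) : List (List Int) :=
  ass.set d.toNat (PySem.List.pyGetD ass d [] ++ [node])

-- A's inner 'for dpu in sorted_dpus: if there is space: append, record, break'
def pvPlaceA (ass : List (List Int)) (ntd : PySem.Dict Int Int) (node : Int) :
    List Int → (List (List Int) × PySem.Dict Int Int)
  | [] => (ass, ntd)
  | d :: rest =>
      if (PySem.List.pyGetD ass d []).length < 50 then
        (pvAppendAt ass d node, ntd.insert node d)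
      else pvPlaceA ass ntd node rest

def greedy_schedule (network : List (List Int)) : List (List Int) :=
  ((PySem.List.pyRange 0 (network.length : Int)).foldl
    (fun st node =>
      pvPlaceA st.1 st.2 node
        (PySem.List.sorted (PySem.List.pyRange 0 100)
          (fun i => -(PySem.List.pyGetD
            (pvNeighborCounts st.2 (PySem.List.pyGetD network node [])) i 0))))
    (List.replicate 100 ([] : List Int), PySem.Dict.empty)).1

-- ===== PORT B =====
-- B's linear best-DPU scan: state (best, best_count), initial (None, 0)
def pvBestScan (ass : List (List Int)) (nc : List Int) : Option Int × Int :=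
  (PySem.List.pyRange 0 100).foldl
    (fun b d =>
      if (PySem.List.pyGetD ass d []).length < 50 &&
         (b.1.isNone || decide (PySem.List.pyGetD nc d 0 > b.2)) then
        (some d, PySem.List.pyGetD nc d 0)
      else b)
    (none, 0)

def greedy_schedule_alt (network : List (List Int)) : List (List Int) :=
  ((PySem.List.enumerate network).foldl
    (fun st p =>
      match (pvBestScan st.1 (pvNeighborCounts st.2 p.2)).1 with
      | some d => (pvAppendAt st.1 d p.1, st.2.insert p.1 d)
      | none => st)
    (List.replicate 100 ([] : List Int), PySem.Dict.empty)).1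

-- ===== PRECONDITION & SPEC =====
def Spec_greedy_schedule (network : List (List Int)) (out : List (List Int)) : Prop := out = greedy_schedule_alt network
instance (network : List (List Int)) (out : List (List Int)) : Decidable (Spec_greedy_schedule network out) := by unfold Spec_greedy_schedule; infer_instance

-- ===== CLAIM (what is proved, stated in full; the proofs are below) =====
def Claim_equal_greedy_schedule : Prop := ∀ (network : List (List Int)), Dom_greedy_schedule network → Spec_greedy_schedule network (greedy_schedule network)

-- ===== LEMMAS AND PROOFS =====

-- the selection both programs compute: the first element of l passing P with minimal key k
def pvScan (k : Int → Int) (P : Int → Bool) (l : List Int) : Option Int :=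
  l.foldl (fun b d =>
    if P d && (match b with | none => true | some m => decide (k d < k m)) then some d else b)
    none

-- first P-element after a stable sorted-insert of x into a key-sorted list
theorem pvFind_insertBy (k : Int → Int) (P : Int → Bool) (x : Int) (ys : List Int)
    (hs : ys.Pairwise (fun a b => k a ≤ k b)) :
    (PySem.List.insertBy (fun a b => decide (k a < k b)) x ys).find? P =
      match ys.find? P with
      | none => if P x then some x else none
      | some m => if P x && decide (k x < k m) then some x else some m := by
  induction ys with
  | nil =>
    cases hPx : P x <;> simp [PySem.List.insertBy, List.find?, hPx]
  | cons y ys ih =>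
    rw [List.pairwise_cons] at hs
    obtain ⟨hy, hs'⟩ := hs
    by_cases hxy : k x < k y
    · simp only [PySem.List.insertBy, hxy, decide_true, if_true]
      cases hfind : (y :: ys).find? P with
      | none =>
        cases hPx : P x <;> simp [hPx, hfind]
      | some m =>
        have hm : m ∈ y :: ys := List.mem_of_find?_eq_some hfind
        have hkm : k x < k m := by
          rcases List.mem_cons.mp hm with rfl | hm'
          · exact hxy
          · exact lt_of_lt_of_le hxy (hy m hm')
        cases hPx : P x <;> simp [hPx, hfind, hkm]
    · have hnb : (decide (k x < k y)) = false := by simp [hxy]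
      simp only [PySem.List.insertBy, hnb, Bool.false_eq_true, if_false]
      cases hPy : P y with
      | true => simp [hPy, hxy]
      | false =>
        simp only [List.find?_cons, hPy]
        exact ih hs'

-- A's first-fit over the stable descending sort IS the single min-key (= max-count) scan
theorem pvFind_sorted_eq_scan (k : Int → Int) (P : Int → Bool) (l : List Int) :
    (PySem.List.sorted l k).find? P = pvScan k P l := by
  induction l using List.reverseRecOn with
  | nil => rfl
  | append_singleton l x ih =>
    have h1 : PySem.List.sorted (l ++ [x]) k =
        PySem.List.insertBy (fun a b => decide (k a < k b)) x (PySem.List.sorted l k) := by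
      rw [PySem.List.sorted_eq_foldl_insertBy, PySem.List.sorted_eq_foldl_insertBy,
        List.foldl_append]
      rfl
    rw [h1, pvFind_insertBy k P x _ (PySem.List.sorted_pairwise l k), ih]
    unfold pvScan
    rw [List.foldl_append]
    simp only [List.foldl_cons, List.foldl_nil]
    cases hb : l.foldl (fun b d =>
        if P d && (match b with | none => true | some m => decide (k d < k m)) then some d else b)
        none with
    | none => simp
    | some m => simp

-- B's (best, best_count) fold projects to pvScan; invariant: best_count = count of best
theorem pvBestScan_aux (count : Int → Int) (Q : Int → Bool) (l : List Int) :
    ∀ (b : Option Int × Int), (b.1 = none ∨ ∃ m, b.1 = some m ∧ b.2 = count m) →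
    (l.foldl (fun b d =>
        if Q d && (b.1.isNone || decide (count d > b.2)) then (some d, count d) else b) b).1
    = l.foldl (fun o d =>
        if Q d && (match o with | none => true | some m => decide (-(count d) < -(count m)))
        then some d else o) b.1 := by
  induction l with
  | nil => intro b _; rfl
  | cons d l ih =>
    intro b hb
    simp only [List.foldl_cons]
    have hcond : (Q d && (b.1.isNone || decide (count d > b.2))) =
        (Q d && (match b.1 with | none => true | some m => decide (-(count d) < -(count m)))) := by
      rcases hb with h1 | ⟨m, h1, h2⟩
      · rw [h1]; simp
      · rw [h1, h2]
        simp only [Option.isNone_some, Bool.false_or]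
        have : (decide (count d > count m)) = (decide (-(count d) < -(count m))) := by
          apply Bool.decide_congr; omega
        rw [this]
    by_cases hc : (Q d && (b.1.isNone || decide (count d > b.2))) = true
    · rw [if_pos hc, if_pos (hcond ▸ hc)]
      exact ih (some d, count d) (Or.inr ⟨d, rfl, rfl⟩)
    · rw [if_neg hc, if_neg (hcond ▸ hc)]
      exact ih b hb

theorem pvBestScan_eq_scan (ass : List (List Int)) (nc : List Int) :
    (pvBestScan ass nc).1 =
      pvScan (fun d => -(PySem.List.pyGetD nc d 0))
        (fun d => decide ((PySem.List.pyGetD ass d []).length < 50))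
        (PySem.List.pyRange 0 100) := by
  unfold pvBestScan pvScan
  exact pvBestScan_aux (fun d => PySem.List.pyGetD nc d 0)
    (fun d => decide ((PySem.List.pyGetD ass d []).length < 50))
    (PySem.List.pyRange 0 100) (none, 0) (Or.inl rfl)

-- A's place-with-break loop is 'find? then update'
theorem pvPlaceA_eq_find (ass : List (List Int)) (ntd : PySem.Dict Int Int) (node : Int)
    (ds : List Int) :
    pvPlaceA ass ntd node ds =
      match ds.find? (fun d => decide ((PySem.List.pyGetD ass d []).length < 50)) with
      | some d => (pvAppendAt ass d node, ntd.insert node d)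
      | none => (ass, ntd) := by
  induction ds with
  | nil => rfl
  | cons d rest ih =>
    by_cases h : (PySem.List.pyGetD ass d []).length < 50
    · simp [pvPlaceA, h]
    · simp only [pvPlaceA, List.find?_cons, h, decide_false]
      exact ih

-- per-node step equality (any state)
theorem pvStep_eq (ass : List (List Int)) (ntd : PySem.Dict Int Int) (node : Int)
    (row : List Int) :
    pvPlaceA ass ntd node
      (PySem.List.sorted (PySem.List.pyRange 0 100)
        (fun i => -(PySem.List.pyGetD (pvNeighborCounts ntd row) i 0)))
    = match (pvBestScan ass (pvNeighborCounts ntd row)).1 with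
      | some d => (pvAppendAt ass d node, ntd.insert node d)
      | none => (ass, ntd) := by
  rw [pvPlaceA_eq_find, pvBestScan_eq_scan, pvFind_sorted_eq_scan]

theorem pvEnumerate_append_singleton {α : Type} (l : List α) (x : α) (s : Int) :
    PySem.List.enumerate (l ++ [x]) s = PySem.List.enumerate l s ++ [(s + l.length, x)] := by
  induction l generalizing s with
  | nil => simp [PySem.List.enumerate]
  | cons y l ih =>
    simp only [List.cons_append, PySem.List.enumerate, ih, List.length_cons]
    have : s + 1 + (l.length : Int) = s + ((l.length + 1 : Nat) : Int) := by push_cast; ring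
    rw [this]

-- 'for node in range(len(network)): network[node]' is the fold over enumerate(network)
theorem pvFoldl_pyRange_len {α σ : Type} (L : List α) (dflt : α) (f : σ → α → Int → σ) (s0 : σ) :
    (PySem.List.pyRange 0 (L.length : Int)).foldl
        (fun st i => f st (PySem.List.pyGetD L i dflt) i) s0
    = (PySem.List.enumerate L).foldl (fun st p => f st p.2 p.1) s0 := by
  rw [PySem.List.pyRange_zero_natCast, List.foldl_map]
  induction L using List.reverseRecOn with
  | nil => rfl
  | append_singleton l x ih =>
    rw [List.length_append, List.length_singleton, List.range_succ, List.foldl_append,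
      pvEnumerate_append_singleton, List.foldl_append]
    have hcongr : (List.range l.length).foldl
        (fun st (i : Nat) => f st (PySem.List.pyGetD (l ++ [x]) (i : Int) dflt) (i : Int)) s0
        = (List.range l.length).foldl
        (fun st (i : Nat) => f st (PySem.List.pyGetD l (i : Int) dflt) (i : Int)) s0 := by
      apply PySem.List.foldl_congr_mem
      intro acc i hi
      have hi' : i < l.length := List.mem_range.mp hi
      rw [PySem.List.pyGetD_eq_getElem (l ++ [x]) dflt (by positivity) (by simp; omega),
          PySem.List.pyGetD_eq_getElem l dflt (by positivity) (by simpa using hi')]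
      congr 1
      · rw [List.getElem_append_left (by simpa using hi')]
    rw [hcongr, ih]
    simp only [List.foldl_cons, List.foldl_nil]
    rw [PySem.List.pyGetD_eq_getElem (l ++ [x]) dflt (by positivity) (by simp)]
    simp

-- ===== VERDICT (by name: the statement is the Claim_ definition above) =====
theorem greedy_schedule_spec : Claim_equal_greedy_schedule := by
  intro network _
  unfold Spec_greedy_schedule greedy_schedule greedy_schedule_alt
  refine congrArg Prod.fst ?_
  rw [pvFoldl_pyRange_len network ([] : List Int)
    (fun (st : List (List Int) × PySem.Dict Int Int) (row : List Int) (node : Int) =>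
      pvPlaceA st.1 st.2 node
        (PySem.List.sorted (PySem.List.pyRange 0 100)
          (fun i => -(PySem.List.pyGetD (pvNeighborCounts st.2 row) i 0))))
    (List.replicate 100 ([] : List Int), PySem.Dict.empty)]
  apply PySem.List.foldl_congr_mem
  intro acc p _
  exact pvStep_eq acc.1 acc.2 p.1 p.2
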